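-- pv_equiv track=rewrite | github.com/lynderup/Bioinformatic-project | src/reduce_noise.py | count_in_window
-- ===== SOURCE A (Python) =====
-- def count_in_window(window):
--     number_of_is = 0
--     number_of_Ms = 0
--     number_of_os = 0
--
--
--     for x in window:
--         if x == "i":
--             number_of_is += 1
--         elif x == "M":
--             number_of_Ms += 1
--         elif x == "o":
--             number_of_os += 1
--
--     return number_of_is, number_of_Ms, number_of_os
-- ===== SOURCE B (Python) =====
-- def count_in_window(window):
--     return window.count("i"), window.count("M"), window.count("o")
-- ===== Notes on version B (the rewrite author's own statement) =====
-- stated objective: simpler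
-- what changed: B makes three separate list.count passes, one per target symbol, instead of A's single loop threading three branch-incremented accumulators.
import Mathlib
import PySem

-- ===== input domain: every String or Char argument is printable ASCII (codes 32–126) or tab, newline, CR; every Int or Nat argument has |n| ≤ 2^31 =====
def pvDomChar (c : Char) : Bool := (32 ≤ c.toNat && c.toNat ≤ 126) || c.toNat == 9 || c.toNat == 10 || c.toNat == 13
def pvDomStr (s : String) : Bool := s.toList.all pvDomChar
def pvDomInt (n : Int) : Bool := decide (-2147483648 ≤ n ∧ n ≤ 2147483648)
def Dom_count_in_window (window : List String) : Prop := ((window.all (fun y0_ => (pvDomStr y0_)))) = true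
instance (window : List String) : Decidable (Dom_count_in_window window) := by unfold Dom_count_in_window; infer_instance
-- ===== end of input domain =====

-- B replaces A's single loop with three accumulators by three staged list.count passes, one per symbol (simpler; same cost).

-- ===== PORT A =====
-- A: one fold over the window threading three accumulators, if/elif chain
def count_in_window (window : List String) : Int × Int × Int :=
  window.foldl (fun (acc : Int × Int × Int) x =>
    if x == "i" then (acc.1 + 1, acc.2.1, acc.2.2)
    else if x == "M" then (acc.1, acc.2.1 + 1, acc.2.2)
    else if x == "o" then (acc.1, acc.2.1, acc.2.2 + 1)
    else acc) (0, 0, 0)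

-- ===== PORT B =====
-- B: three separate list.count scans
def count_in_window_alt (window : List String) : Int × Int × Int :=
  (PySem.List.count window "i", PySem.List.count window "M", PySem.List.count window "o")

-- ===== PRECONDITION & SPEC =====
def Spec_count_in_window (window : List String) (out : Int × Int × Int) : Prop := out = count_in_window_alt window
instance (window : List String) (out : Int × Int × Int) : Decidable (Spec_count_in_window window out) := by unfold Spec_count_in_window; infer_instance

-- ===== CLAIM (what is proved, stated in full; the proofs are below) =====
def Claim_equal_count_in_window : Prop := ∀ (window : List String), Dom_count_in_window window → Spec_count_in_window window (count_in_window window)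

-- ===== LEMMAS AND PROOFS =====
theorem foldl_counts (window : List String) (init : Int × Int × Int) :
    window.foldl (fun (acc : Int × Int × Int) x =>
      if x == "i" then (acc.1 + 1, acc.2.1, acc.2.2)
      else if x == "M" then (acc.1, acc.2.1 + 1, acc.2.2)
      else if x == "o" then (acc.1, acc.2.1, acc.2.2 + 1)
      else acc) init
    = (init.1 + window.count "i", init.2.1 + window.count "M", init.2.2 + window.count "o") := by
  induction window generalizing init with
  | nil => simp
  | cons h t ih =>
    rw [List.foldl_cons, ih]
    by_cases h1 : h = "i"
    · subst h1; simp [Prod.ext_iff]; omega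
    · by_cases h2 : h = "M"
      · subst h2; simp [h1, Prod.ext_iff]; omega
      · by_cases h3 : h = "o"
        · subst h3; simp [h1, h2, Prod.ext_iff]; omega
        · simp [h1, h2, h3]

-- ===== VERDICT (by name: the statement is the Claim_ definition above) =====
theorem count_in_window_spec : Claim_equal_count_in_window := by
  intro window _
  unfold Spec_count_in_window count_in_window count_in_window_alt
  rw [foldl_counts]
  simp [PySem.List.count]
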